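-- pv_equiv track=rewrite | github.com/martin-bachmann/project-data-structures-two | src/analyze_log.py | verificar_dias_nao_pedidos
-- ===== SOURCE A (Python) =====
-- def contador_nao_pedidos(data):
--     nao_pedidos = set()
--
--     for pedido in data.items():
--         if pedido[1] == 0:
--             nao_pedidos.add(pedido[0])
--
--     return nao_pedidos
--
-- def verificar_dias_nao_pedidos(data, cliente):
--     pedidos = {}
--     for item in data:
--         if item["dia"] not in pedidos:
--             pedidos[item["dia"]] = 0
--         if item["cliente"] == cliente:
--             pedidos[item["dia"]] += 1
--
--     return contador_nao_pedidos(pedidos)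
-- ===== SOURCE B (Python) =====
-- def verificar_dias_nao_pedidos(data, cliente):
--     dias = dict.fromkeys(item["dia"] for item in data)
--     return {dia for dia in dias
--             if not any(item["dia"] == dia and item["cliente"] == cliente
--                        for item in data)}
-- ===== Notes on version B (the rewrite author's own statement) =====
-- stated objective: alternative
-- what changed: Drops the per-day counter dict and the zero-count helper: B first dedups the days with dict.fromkeys, then decides each day by an any() membership scan of the data for an order by the client, instead of maintaining running counts.
import Mathlib
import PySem

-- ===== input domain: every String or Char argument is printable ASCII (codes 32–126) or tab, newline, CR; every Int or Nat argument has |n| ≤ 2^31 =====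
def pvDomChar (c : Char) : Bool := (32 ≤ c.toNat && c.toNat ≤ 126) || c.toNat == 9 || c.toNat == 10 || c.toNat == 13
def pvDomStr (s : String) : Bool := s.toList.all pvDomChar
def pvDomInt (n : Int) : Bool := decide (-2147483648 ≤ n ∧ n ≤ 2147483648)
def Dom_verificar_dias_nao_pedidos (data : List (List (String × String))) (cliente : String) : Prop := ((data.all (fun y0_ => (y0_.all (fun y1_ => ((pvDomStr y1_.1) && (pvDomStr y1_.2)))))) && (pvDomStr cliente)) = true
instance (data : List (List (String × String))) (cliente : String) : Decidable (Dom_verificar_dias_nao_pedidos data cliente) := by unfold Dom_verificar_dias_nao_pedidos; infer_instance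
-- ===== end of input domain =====

-- B drops A's per-day counter dict and zero-count helper: it dedups the days and decides
-- each day by an any()-scan of the data for an order by the client (alternative algorithm,
-- not claimed faster).

-- item["k"]: lookup in the item dict; total form with default "", used only under Pre_
-- (which guarantees the key is present, exactly where Python does not raise KeyError).
def pyKey (item : List (String × String)) (k : String) : String :=
  ((PySem.Dict.mk item).get? k).getD ""

-- ===== PORT A =====
def contador_nao_pedidos (data : PySem.Dict String Int) : List String :=
  data.items.foldl
    (fun nao_pedidos pedido =>
      if pedido.2 == 0 then PySem.Set.add nao_pedidos pedido.1 else nao_pedidos)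
    PySem.Set.empty

def verificar_dias_nao_pedidos (data : List (List (String × String))) (cliente : String) : List String :=
  let pedidos := data.foldl
    (fun pedidos item =>
      let pedidos := if !pedidos.contains (pyKey item "dia")
                     then pedidos.insert (pyKey item "dia") 0 else pedidos
      if pyKey item "cliente" == cliente
      then pedidos.insert (pyKey item "dia") (pedidos.getD (pyKey item "dia") 0 + 1)
      else pedidos)
    PySem.Dict.empty
  contador_nao_pedidos pedidos

-- ===== PORT B =====
def verificar_dias_nao_pedidos_alt (data : List (List (String × String))) (cliente : String) : List String :=
  let dias := PySem.List.dedup (data.map (fun item => pyKey item "dia"))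
  dias.filter (fun dia =>
    !(data.any (fun item => pyKey item "dia" == dia && pyKey item "cliente" == cliente)))

-- ===== PRECONDITION & SPEC =====
-- Pre_: every item carries both keys "dia" and "cliente" — exactly where A's item["dia"] /
-- item["cliente"] do not raise KeyError.
def Pre_verificar_dias_nao_pedidos (data : List (List (String × String))) (cliente : String) : Prop :=
  data.all (fun item => (PySem.Dict.mk item).contains "dia" && (PySem.Dict.mk item).contains "cliente") = true
instance (data : List (List (String × String))) (cliente : String) : Decidable (Pre_verificar_dias_nao_pedidos data cliente) := by unfold Pre_verificar_dias_nao_pedidos; infer_instance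
def pvWitness_verificar_dias_nao_pedidos : (List (List (String × String))) × String :=
  ([[("dia", "mon"), ("cliente", "bob")], [("dia", "tue"), ("cliente", "ann")]], "bob")

def Spec_verificar_dias_nao_pedidos (data : List (List (String × String))) (cliente : String) (out : List String) : Prop := out = verificar_dias_nao_pedidos_alt data cliente
instance (data : List (List (String × String))) (cliente : String) (out : List String) : Decidable (Spec_verificar_dias_nao_pedidos data cliente out) := by unfold Spec_verificar_dias_nao_pedidos; infer_instance

-- ===== CLAIM (what is proved, stated in full; the proofs are below) =====
def Claim_equal_verificar_dias_nao_pedidos : Prop := ∀ (data : List (List (String × String))) (cliente : String), Dom_verificar_dias_nao_pedidos data cliente → Pre_verificar_dias_nao_pedidos data cliente → Spec_verificar_dias_nao_pedidos data cliente (verificar_dias_nao_pedidos data cliente)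

-- ===== LEMMAS AND PROOFS =====

-- does `item` match day `k` for this client?
def matchP (cliente k : String) (item : List (String × String)) : Bool :=
  pyKey item "dia" == k && pyKey item "cliente" == cliente

-- the loop invariant: after processing `pre`, A's counter dict has exactly the days of
-- `pre` (first occurrences, in order) as keys, and a key's count is non-zero iff some
-- processed item is an order by the client on that day.
def PedInv (cliente : String) (d : PySem.Dict String Int)
    (pre : List (List (String × String))) : Prop :=
  d.keys.Nodup ∧ d.keys = PySem.List.dedup (pre.map (fun item => pyKey item "dia")) ∧
  (∀ k v, d.get? k = some v → 0 ≤ v ∧ (v ≠ 0 ↔ pre.any (matchP cliente k) = true))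

lemma inv_init (cliente : String) : PedInv cliente PySem.Dict.empty [] := by
  refine ⟨by simp [PySem.Dict.empty, PySem.Dict.keys], by simp [PySem.Dict.empty, PySem.Dict.keys, PySem.List.dedup], ?_⟩
  simp [PySem.Dict.empty, PySem.Dict.get?]

lemma dedup_append_one (l : List String) (x : String) :
    PySem.List.dedup (l ++ [x]) =
      if x ∈ PySem.List.dedup l then PySem.List.dedup l else PySem.List.dedup l ++ [x] := by
  simp only [PySem.List.dedup_eq_ofList, PySem.Set.ofList_eq_foldl, List.foldl_append,
    List.foldl_cons, List.foldl_nil]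
  simp [PySem.Set.add, PySem.Set.contains]

lemma inv_step (cliente : String) (item : List (String × String))
    {d : PySem.Dict String Int} {pre : List (List (String × String))}
    (h : PedInv cliente d pre) :
    PedInv cliente
      ((fun pedidos item =>
        let pedidos := if !pedidos.contains (pyKey item "dia")
                       then pedidos.insert (pyKey item "dia") 0 else pedidos
        if pyKey item "cliente" == cliente
        then pedidos.insert (pyKey item "dia") (pedidos.getD (pyKey item "dia") 0 + 1)
        else pedidos) d item)
      (pre ++ [item]) := by
  obtain ⟨hnd, hkeys, hval⟩ := h
  beta_reduce
  set dia := pyKey item "dia" with hdia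
  have hanyapp : ∀ k, (pre ++ [item]).any (matchP cliente k) =
      (pre.any (matchP cliente k) || matchP cliente k item) := by
    intro k; simp [List.any_append]
  have hdedapp : PySem.List.dedup ((pre ++ [item]).map (fun it => pyKey it "dia")) =
      if dia ∈ PySem.List.dedup (pre.map (fun it => pyKey it "dia"))
      then PySem.List.dedup (pre.map (fun it => pyKey it "dia"))
      else PySem.List.dedup (pre.map (fun it => pyKey it "dia")) ++ [dia] := by
    rw [List.map_append]; exact dedup_append_one _ _
  have hmemkeys : d.contains dia = true ↔ dia ∈ d.keys := PySem.Dict.contains_iff_mem_keys d dia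
  by_cases hc : d.contains dia = true
  · -- dia already a key: keys unchanged
    have hdin : dia ∈ PySem.List.dedup (pre.map (fun it => pyKey it "dia")) :=
      hkeys ▸ hmemkeys.mp hc
    simp only [hc, Bool.not_true, Bool.false_eq_true, if_false]
    by_cases hcl : (pyKey item "cliente" == cliente) = true
    · simp only [hcl, if_true]
      have hvs : (d.get? dia).isSome := by
        rw [← PySem.Dict.contains_eq_isSome_get? d dia]; exact hc
      obtain ⟨v, hv⟩ := Option.isSome_iff_exists.mp hvs
      have hv0 := hval dia v hv
      refine ⟨?_, ?_, ?_⟩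
      · rw [PySem.Dict.keys_insert_of_contains d _ hc]; exact hnd
      · rw [PySem.Dict.keys_insert_of_contains d _ hc, hdedapp, if_pos hdin]; exact hkeys
      · intro k w hw
        by_cases hk : k = dia
        · subst hk
          rw [PySem.Dict.get?_insert_self] at hw
          have : w = d.getD dia 0 + 1 := by injection hw with h; exact h.symm
          have hg : d.getD dia 0 = v := PySem.Dict.getD_of_get?_eq_some d 0 hv
          subst this; rw [hg]
          have hm : matchP cliente dia item = true := by
            simp [matchP, ← hdia, hcl]
          refine ⟨by have := hv0.1; omega, ?_⟩
          rw [hanyapp, hm]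
          constructor
          · intro _; simp
          · intro _; have := hv0.1; omega
        · rw [PySem.Dict.get?_insert_of_ne d _ hk] at hw
          have := hval k w hw
          have hm : matchP cliente k item = false := by
            simp [matchP, ← hdia]; intro h; exact absurd h.symm hk
          refine ⟨this.1, ?_⟩
          rw [hanyapp, hm, this.2]; simp
    · rw [Bool.not_eq_true] at hcl
      simp only [hcl, Bool.false_eq_true, if_false]
      refine ⟨hnd, by rw [hdedapp, if_pos hdin]; exact hkeys, ?_⟩
      intro k w hw
      have := hval k w hw
      have hm : matchP cliente k item = false := by
        simp [matchP, ← hdia, hcl]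
      refine ⟨this.1, ?_⟩
      rw [hanyapp, hm, this.2]; simp
  · -- dia a new key
    rw [Bool.not_eq_true] at hc
    have hdout : dia ∉ PySem.List.dedup (pre.map (fun it => pyKey it "dia")) := by
      rw [← hkeys]
      intro hm
      rw [hmemkeys.mpr hm] at hc
      exact Bool.true_eq_false.mp hc
    have hkeys1 : (d.insert dia 0).keys = d.keys ++ [dia] :=
      PySem.Dict.keys_insert_of_not_contains d _ hc
    have hnd1 : (d.insert dia 0).keys.Nodup := by
      rw [hkeys1]
      exact List.Nodup.append hnd (List.nodup_singleton dia)
        (by simp; intro h; exact hdout (hkeys ▸ h))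
    have hded1 : (d.insert dia 0).keys =
        PySem.List.dedup ((pre ++ [item]).map (fun it => pyKey it "dia")) := by
      rw [hkeys1, hdedapp, if_neg hdout, hkeys]
    simp only [hc, Bool.not_false, if_true]
    by_cases hcl : (pyKey item "cliente" == cliente) = true
    · simp only [hcl, if_true]
      have hc1 : (d.insert dia 0).contains dia = true := PySem.Dict.contains_insert_self d dia 0
      refine ⟨?_, ?_, ?_⟩
      · rw [PySem.Dict.keys_insert_of_contains _ _ hc1]; exact hnd1
      · rw [PySem.Dict.keys_insert_of_contains _ _ hc1]; exact hded1
      · intro k w hw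
        by_cases hk : k = dia
        · subst hk
          rw [PySem.Dict.get?_insert_self] at hw
          have hg : (d.insert dia 0).getD dia 0 = 0 :=
            PySem.Dict.getD_of_get?_eq_some _ 0 (PySem.Dict.get?_insert_self d dia 0)
          rw [hg] at hw
          have : w = 0 + 1 := by injection hw with h; exact h.symm
          subst this
          have hm : matchP cliente dia item = true := by simp [matchP, ← hdia, hcl]
          refine ⟨by omega, ?_⟩
          rw [hanyapp, hm]
          exact ⟨fun _ => by simp, fun _ => one_ne_zero⟩
        · rw [PySem.Dict.get?_insert_of_ne _ _ hk,
              PySem.Dict.get?_insert_of_ne _ _ hk] at hw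
          have := hval k w hw
          have hm : matchP cliente k item = false := by
            simp [matchP, ← hdia]; intro h; exact absurd h.symm hk
          refine ⟨this.1, ?_⟩
          rw [hanyapp, hm, this.2]; simp
    · rw [Bool.not_eq_true] at hcl
      simp only [hcl, Bool.false_eq_true, if_false]
      refine ⟨hnd1, hded1, ?_⟩
      intro k w hw
      have hm : matchP cliente k item = false := by simp [matchP, ← hdia, hcl]
      by_cases hk : k = dia
      · subst hk
        rw [PySem.Dict.get?_insert_self] at hw
        have : w = 0 := by injection hw with h; exact h.symm
        subst this
        have hpre : pre.any (matchP cliente dia) = false := by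
          by_contra h
          rw [Bool.not_eq_false, List.any_eq_true] at h
          obtain ⟨it, hit, hm'⟩ := h
          simp [matchP] at hm'
          exact hdout (by
            rw [PySem.List.dedup_eq_ofList, PySem.Set.mem_ofList]
            exact hm'.1 ▸ List.mem_map_of_mem hit)
        refine ⟨le_refl 0, ?_⟩
        rw [hanyapp, hpre, hm]; simp
      · rw [PySem.Dict.get?_insert_of_ne _ _ hk] at hw
        have := hval k w hw
        refine ⟨this.1, ?_⟩
        rw [hanyapp, hm, this.2]; simp

-- A's zero-count scan collects, in order, the keys of the items with value 0
lemma contador_fold (l : List (String × Int)) (s : PySem.Set String)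
    (hdis : ∀ p ∈ l, p.1 ∉ s) (hnd : (l.map (·.1)).Nodup) :
    l.foldl (fun nao_pedidos pedido =>
        if pedido.2 == 0 then PySem.Set.add nao_pedidos pedido.1 else nao_pedidos) s
      = s ++ (l.filter (fun p => p.2 == 0)).map (·.1) := by
  induction l generalizing s with
  | nil => simp
  | cons p l ih =>
    simp only [List.map_cons, List.nodup_cons] at hnd
    by_cases h0 : (p.2 == 0) = true
    · have hadd : PySem.Set.add s p.1 = s ++ [p.1] := by
        simp only [PySem.Set.add, PySem.Set.contains]
        rw [if_neg]; simp [hdis p (by simp)]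
      simp only [List.foldl_cons, h0, if_true, hadd, List.filter_cons, List.map_cons]
      rw [ih (s ++ [p.1]) ?_ hnd.2]
      · simp
      · intro q hq
        simp only [List.mem_append, List.mem_singleton]
        rintro (hqs | hqp)
        · exact hdis q (by simp [hq]) hqs
        · exact hnd.1 (hqp ▸ List.mem_map_of_mem hq)
    · simp only [List.foldl_cons, h0, Bool.false_eq_true, if_false, List.filter_cons]
      rw [ih s (fun q hq => hdis q (by simp [hq])) hnd.2]

-- at a state matching the full input, A's scan computes B's dedup-and-filter result
lemma final_eq (cliente : String) {d : PySem.Dict String Int}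
    {data : List (List (String × String))} (h : PedInv cliente d data) :
    contador_nao_pedidos d =
      (PySem.List.dedup (data.map (fun item => pyKey item "dia"))).filter
        (fun dia => !(data.any (matchP cliente dia))) := by
  obtain ⟨hnd, hkeys, hval⟩ := h
  unfold contador_nao_pedidos
  rw [contador_fold d.items PySem.Set.empty (by simp [PySem.Set.empty]) (by exact hnd)]
  simp only [PySem.Set.empty, List.nil_append]
  rw [← hkeys]
  simp only [PySem.Dict.keys]
  rw [List.filter_map]
  congr 1
  apply List.filter_congr
  intro p hp
  have hget : d.get? p.1 = some p.2 :=
    (PySem.Dict.get?_eq_some_iff_mem_items d p.1 p.2 hnd).mpr hp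
  have hiff := (hval p.1 p.2 hget).2
  simp only [Function.comp]
  by_cases hm : data.any (matchP cliente p.1) = true
  · have : p.2 ≠ 0 := hiff.mpr hm
    simp [hm, this]
  · rw [Bool.not_eq_true] at hm
    have : p.2 = 0 := by by_contra h; exact absurd (hiff.mp h) (by simp [hm])
    simp [hm, this]

lemma loop_eq (cliente : String) (rest : List (List (String × String)))
    (d : PySem.Dict String Int) (pre : List (List (String × String)))
    (h : PedInv cliente d pre) :
    contador_nao_pedidos (rest.foldl
      (fun pedidos item =>
        let pedidos := if !pedidos.contains (pyKey item "dia")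
                       then pedidos.insert (pyKey item "dia") 0 else pedidos
        if pyKey item "cliente" == cliente
        then pedidos.insert (pyKey item "dia") (pedidos.getD (pyKey item "dia") 0 + 1)
        else pedidos) d)
    = (PySem.List.dedup ((pre ++ rest).map (fun item => pyKey item "dia"))).filter
        (fun dia => !((pre ++ rest).any (matchP cliente dia))) := by
  induction rest generalizing d pre with
  | nil => simpa using final_eq cliente h
  | cons item rest ih =>
    simp only [List.foldl_cons]
    have := ih _ (pre ++ [item]) (inv_step cliente item h)
    simpa [List.append_assoc] using this

-- ===== VERDICT (by name: the statement is the Claim_ definition above) =====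
theorem verificar_dias_nao_pedidos_spec : Claim_equal_verificar_dias_nao_pedidos := by
  intro data cliente _ _
  unfold Spec_verificar_dias_nao_pedidos verificar_dias_nao_pedidos verificar_dias_nao_pedidos_alt
  have := loop_eq cliente data PySem.Dict.empty [] (inv_init cliente)
  simpa [matchP] using this
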